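-- pv_equiv track=rewrite | github.com/GO-TECH-AFRICA-LTD/GO-CBT-LICENSE | GO_CBT_APP_Desktop/splash_screen.py | _zwsp_wrap_text
-- ===== SOURCE A (Python) =====
-- _ZWSP = "\u200b"
--
-- def _zwsp_wrap_text(s: str) -> str:
--     def soften(token: str) -> str:
--         if " " in token:
--             return token
--         t = token
--         t = t.replace("/", "/" + _ZWSP)
--         t = t.replace(".", _ZWSP + "." + _ZWSP)
--         t = t.replace("@", _ZWSP + "@" + _ZWSP)
--         t = t.replace("-", "-" + _ZWSP)
--         t = t.replace("_", "_" + _ZWSP)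
--         return t
--     return " ".join(soften(tok) for tok in s.split())
-- ===== SOURCE B (Python) =====
-- _ZWSP = "\u200b"
--
-- _SUB = {
--     "/": "/" + _ZWSP,
--     ".": _ZWSP + "." + _ZWSP,
--     "@": _ZWSP + "@" + _ZWSP,
--     "-": "-" + _ZWSP,
--     "_": "_" + _ZWSP,
-- }
--
-- def _zwsp_wrap_text(s: str) -> str:
--     # single fused character-level scan: tokenize and decorate in one pass
--     # (no split(), no replace()); a pending-space flag collapses whitespace runs
--     out = []
--     need_sep = False
--     for c in s:
--         if c.isspace():
--             need_sep = bool(out)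
--         else:
--             if need_sep:
--                 out.append(" ")
--                 need_sep = False
--             out.append(_SUB.get(c, c))
--     return "".join(out)
-- ===== Notes on version B (the rewrite author's own statement) =====
-- stated objective: alternative
-- what changed: B replaces A's split() into tokens followed by five chained whole-token replace() passes with one fused character-level scan over the string: a state machine with a pending-space flag that collapses whitespace runs and emits each character's decorated form in a single pass.
import Mathlib
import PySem

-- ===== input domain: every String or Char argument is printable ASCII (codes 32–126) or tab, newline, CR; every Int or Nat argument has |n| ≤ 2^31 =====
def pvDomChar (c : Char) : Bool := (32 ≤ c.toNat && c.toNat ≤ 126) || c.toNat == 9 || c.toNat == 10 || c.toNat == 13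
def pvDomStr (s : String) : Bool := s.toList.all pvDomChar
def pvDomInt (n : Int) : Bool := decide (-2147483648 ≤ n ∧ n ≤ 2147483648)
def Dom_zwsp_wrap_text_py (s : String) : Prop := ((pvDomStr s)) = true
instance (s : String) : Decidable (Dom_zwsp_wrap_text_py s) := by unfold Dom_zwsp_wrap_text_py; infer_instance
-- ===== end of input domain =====

-- B replaces A's split-then-five-replace-passes with one fused character-level scan
-- (a pending-space state machine); alternative decomposition, same asymptotic cost.


-- ===== PORT A =====
-- _ZWSP = "\u200b"
def pvZ : Char := Char.ofNat 0x200B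

-- the inner helper 'soften' of A, step for step
def zwspSoften (token : String) : String :=
  if PySem.Str.isIn " " token then token
  else
    let t := token
    let t := PySem.Str.replace t "/" (String.ofList ['/', pvZ])
    let t := PySem.Str.replace t "." (String.ofList [pvZ, '.', pvZ])
    let t := PySem.Str.replace t "@" (String.ofList [pvZ, '@', pvZ])
    let t := PySem.Str.replace t "-" (String.ofList ['-', pvZ])
    let t := PySem.Str.replace t "_" (String.ofList ['_', pvZ])
    t

def zwsp_wrap_text_py (s : String) : String :=
  PySem.Str.join " " ((PySem.Str.split₀ s).map zwspSoften)

-- ===== PORT B =====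
-- _SUB.get(c, c) of Source B: the decorated form of one character
def zwspSub (c : Char) : List Char :=
  if c = '/' then ['/', pvZ]
  else if c = '.' then [pvZ, '.', pvZ]
  else if c = '@' then [pvZ, '@', pvZ]
  else if c = '-' then ['-', pvZ]
  else if c = '_' then ['_', pvZ]
  else [c]

-- Source B's single scan; 'acc' is the output accumulated in reverse, 'sep' the need_sep flag
def zwspGo : List Char → List Char → Bool → List Char
  | [], acc, _ => acc.reverse
  | c :: t, acc, sep =>
    if PySem.Chars.isspace c then zwspGo t acc (!acc.isEmpty)
    else zwspGo t ((zwspSub c).reverse ++ (if sep then ' ' :: acc else acc)) false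

def zwsp_wrap_text_py_alt (s : String) : String :=
  String.ofList (zwspGo s.toList [] false)

-- ===== PRECONDITION & SPEC =====
def Spec_zwsp_wrap_text_py (s : String) (out : String) : Prop := out = zwsp_wrap_text_py_alt s
instance (s : String) (out : String) : Decidable (Spec_zwsp_wrap_text_py s out) := by unfold Spec_zwsp_wrap_text_py; infer_instance

-- ===== CLAIM (what is proved, stated in full; the proofs are below) =====
def Claim_equal_zwsp_wrap_text_py : Prop := ∀ (s : String), Dom_zwsp_wrap_text_py s → Spec_zwsp_wrap_text_py s (zwsp_wrap_text_py s)

-- ===== LEMMAS AND PROOFS =====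

-- ---- A-side reduction: soften is a per-character substitution ----

-- replacement of a single-character pattern is a per-character flatMap
lemma replace_go_single (a : Char) (r : List Char) :
    ∀ (l : List Char) (fuel : Nat) (acc : List Char), l.length ≤ fuel →
    PySem.Chars.replace.go [a] r fuel l acc
      = acc.reverse ++ l.flatMap (fun c => if c = a then r else [c]) := by
  intro l
  induction l with
  | nil => intro fuel acc _; cases fuel <;> simp [PySem.Chars.replace.go]
  | cons c t ih =>
    intro fuel acc h
    cases fuel with
    | zero => simp at h
    | succ fuel =>
      simp only [PySem.Chars.replace.go]
      by_cases hc : c = a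
      · subst hc
        simp [List.isPrefixOf, ih fuel _ (by simpa using h)]
      · have hp : ¬ ([a].isPrefixOf (c :: t) = true) := by
          simp [List.isPrefixOf]; intro h'; exact absurd h'.symm hc
        simp [hp, hc, ih fuel _ (by simpa using h)]

lemma replace_single (a : Char) (r l : List Char) :
    PySem.Chars.replace l [a] r = l.flatMap (fun c => if c = a then r else [c]) := by
  simpa using replace_go_single a r l l.length [] le_rfl

-- every token produced by split₀ contains no whitespace character
lemma split₀_go_no_space :
    ∀ (l cur : List Char) (acc : List (List Char)),
    (∀ c ∈ cur, PySem.Chars.isspace c = false) →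
    (∀ cs ∈ acc, ∀ c ∈ cs, PySem.Chars.isspace c = false) →
    ∀ cs ∈ PySem.Chars.split₀.go l cur acc, ∀ c ∈ cs, PySem.Chars.isspace c = false := by
  intro l
  induction l with
  | nil =>
    intro cur acc hcur hacc cs hcs
    by_cases h : cur = []
    · simp [PySem.Chars.split₀.go, h] at hcs
      exact hacc cs hcs
    · simp [PySem.Chars.split₀.go, h] at hcs
      rcases hcs with hcs | hcs
      · exact hacc cs hcs
      · subst hcs; intro c hc; exact hcur c (List.mem_reverse.mp hc)
  | cons c t ih =>
    intro cur acc hcur hacc cs hcs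
    by_cases hsp : PySem.Chars.isspace c = true
    · by_cases h : cur = []
      · simp only [PySem.Chars.split₀.go, hsp, if_pos, h, List.isEmpty_nil] at hcs
        exact ih [] acc (by simp) hacc cs (by simpa [h] using hcs)
      · have : PySem.Chars.split₀.go (c :: t) cur acc
            = PySem.Chars.split₀.go t [] (cur.reverse :: acc) := by
          simp [PySem.Chars.split₀.go, hsp, h]
        rw [this] at hcs
        refine ih [] _ (by simp) ?_ cs hcs
        intro ds hds d hd
        rcases List.mem_cons.mp hds with hds | hds
        · exact hcur d (List.mem_reverse.mp (hds ▸ hd))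
        · exact hacc ds hds d hd
    · have : PySem.Chars.split₀.go (c :: t) cur acc
          = PySem.Chars.split₀.go t (c :: cur) acc := by
        simp [PySem.Chars.split₀.go, hsp]
      rw [this] at hcs
      refine ih (c :: cur) acc ?_ hacc cs hcs
      intro d hd
      rcases List.mem_cons.mp hd with hd | hd
      · subst hd; simpa using hsp
      · exact hcur d hd

lemma split₀_no_space (s : List Char) :
    ∀ cs ∈ PySem.Chars.split₀ s, ∀ c ∈ cs, PySem.Chars.isspace c = false := by
  intro cs hcs
  exact split₀_go_no_space s [] [] (by simp) (by simp) cs hcs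

-- the five chained per-character substitutions collapse to zwspSub, pointwise
lemma chain_point (c : Char) :
    ((((((if c = '/' then ['/', pvZ] else [c]).flatMap
        (fun d => if d = '.' then [pvZ, '.', pvZ] else [d])).flatMap
        (fun d => if d = '@' then [pvZ, '@', pvZ] else [d])).flatMap
        (fun d => if d = '-' then ['-', pvZ] else [d])).flatMap
        (fun d => if d = '_' then ['_', pvZ] else [d]))) = zwspSub c := by
  by_cases h1 : c = '/'
  · subst h1; decide
  by_cases h2 : c = '.'
  · subst h2; decide
  by_cases h3 : c = '@'
  · subst h3; decide
  by_cases h4 : c = '-'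
  · subst h4; decide
  by_cases h6 : c = '_'
  · subst h6; decide
  · simp [zwspSub, h1, h2, h3, h4, h6]

-- per-token agreement: soften = per-character substitution
lemma soften_eq (tok : String)
    (hns : ∀ c ∈ tok.toList, PySem.Chars.isspace c = false) :
    (zwspSoften tok).toList = tok.toList.flatMap zwspSub := by
  have hguard : PySem.Str.isIn " " tok = false := by
    by_contra h
    have h' : PySem.Str.isIn " " tok = true := by
      cases hb : PySem.Str.isIn " " tok
      · exact absurd hb h
      · rfl
    have hinf := (PySem.Str.isIn_iff_infix _ _).mp h'
    have hmem : ' ' ∈ tok.toList := hinf.sublist.subset (by simp)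
    have := hns ' ' hmem
    simp [PySem.Chars.isspace] at this
  simp only [zwspSoften, hguard, Bool.false_eq_true, if_false]
  simp only [PySem.Str.toList_replace, String.toList_ofList,
    show ("/" : String).toList = ['/'] from by decide,
    show ("." : String).toList = ['.'] from by decide,
    show ("@" : String).toList = ['@'] from by decide,
    show ("-" : String).toList = ['-'] from by decide,
    show ("_" : String).toList = ['_'] from by decide,
    replace_single, List.flatMap_assoc]
  exact List.flatMap_congr (fun c _ => by
    simpa [List.flatMap_assoc] using chain_point c)

-- ---- B-side machinery ----

-- zwspGo with the accumulator peeled off (proof-only reference)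
def zg : List Char → Bool → List Char
  | [], _ => []
  | c :: t, sep =>
    if PySem.Chars.isspace c then zg t true
    else (if sep then [' '] else []) ++ zwspSub c ++ zg t false

lemma zwspSub_ne (c : Char) : zwspSub c ≠ [] := by
  unfold zwspSub; split_ifs <;> simp

lemma zwspGo_eq_zg :
    ∀ (l acc : List Char) (sep : Bool), acc ≠ [] →
    zwspGo l acc sep = acc.reverse ++ zg l sep := by
  intro l
  induction l with
  | nil => intro acc sep _; simp [zwspGo, zg]
  | cons c t ih =>
    intro acc sep hacc
    by_cases hsp : PySem.Chars.isspace c = true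
    · have he : acc.isEmpty = false := by simpa [List.isEmpty_iff] using hacc
      simp [zwspGo, zg, hsp, he, ih acc true hacc]
    · have hacc' : (zwspSub c).reverse ++ (if sep then ' ' :: acc else acc) ≠ [] := by
        have := zwspSub_ne c
        intro h
        rcases List.append_eq_nil_iff.mp h with ⟨h1, _⟩
        exact this (by simpa using h1)
      simp only [zwspGo, zg, hsp, if_false, Bool.false_eq_true,
        ih _ false hacc']
      cases sep <;> simp

-- split₀.go flushes its token accumulator to the front
lemma split₀_go_acc :
    ∀ (l cur : List Char) (acc : List (List Char)),
    PySem.Chars.split₀.go l cur acc = acc.reverse ++ PySem.Chars.split₀.go l cur [] := by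
  intro l
  induction l with
  | nil =>
    intro cur acc
    by_cases h : cur = [] <;> simp [PySem.Chars.split₀.go, h]
  | cons c t ih =>
    intro cur acc
    by_cases hsp : PySem.Chars.isspace c = true
    · by_cases h : cur = []
      · have hred : ∀ a, PySem.Chars.split₀.go (c :: t) cur a
            = PySem.Chars.split₀.go t [] a := by
          intro a; simp [PySem.Chars.split₀.go, hsp, h]
        rw [hred, hred, ih [] acc]
      · have he : cur.isEmpty = false := by simpa [List.isEmpty_iff] using h
        simp only [PySem.Chars.split₀.go, hsp, if_pos, he, Bool.false_eq_true, if_false]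
        rw [ih [] (cur.reverse :: acc), ih [] [cur.reverse]]
        simp
    · simp [PySem.Chars.split₀.go, hsp, ih (c :: cur) acc]

lemma split₀_go_ne :
    ∀ (l cur : List Char), cur ≠ [] → PySem.Chars.split₀.go l cur [] ≠ [] := by
  intro l
  induction l with
  | nil =>
    intro cur h
    have he : cur.isEmpty = false := by simpa [List.isEmpty_iff] using h
    simp [PySem.Chars.split₀.go, he]
  | cons c t ih =>
    intro cur h
    by_cases hsp : PySem.Chars.isspace c = true
    · have he : cur.isEmpty = false := by simpa [List.isEmpty_iff] using h
      simp only [PySem.Chars.split₀.go, hsp, if_pos, he, Bool.false_eq_true, if_false]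
      rw [split₀_go_acc]
      simp
    · simp only [PySem.Chars.split₀.go, hsp, Bool.false_eq_true, if_false]
      exact ih (c :: cur) (by simp)

-- A's whole result from the tail l with a (reversed) partial token cur pending
def Igo (l cur : List Char) : List Char :=
  PySem.Chars.join [' '] ((PySem.Chars.split₀.go l cur []).map (·.flatMap zwspSub))

lemma join_cons (a : List Char) (rest : List (List Char)) :
    PySem.Chars.join [' '] (a :: rest)
      = a ++ (if rest = [] then [] else ' ' :: PySem.Chars.join [' '] rest) := by
  cases rest <;> simp [PySem.Chars.join, List.intercalate]

-- the heart: zg tracks A's join-of-split₀, mid-token (cur ≠ []) and at a boundary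
lemma zg_main :
    ∀ (l : List Char),
      (∀ cur : List Char, cur ≠ [] →
        Igo l cur = cur.reverse.flatMap zwspSub ++ zg l false) ∧
      (zg l true
        = (if PySem.Chars.split₀ l = [] then [] else [' ']) ++ Igo l []) := by
  intro l
  induction l with
  | nil =>
    constructor
    · intro cur h
      have he : cur.isEmpty = false := by simpa [List.isEmpty_iff] using h
      simp [Igo, PySem.Chars.split₀.go, he, zg]
    · simp [zg, PySem.Chars.split₀, PySem.Chars.split₀.go, Igo, PySem.Chars.join,
        List.intercalate]
  | cons c t ih =>
    obtain ⟨ihP, ihQ⟩ := ih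
    by_cases hsp : PySem.Chars.isspace c = true
    · constructor
      · intro cur h
        have he : cur.isEmpty = false := by simpa [List.isEmpty_iff] using h
        have hgo : PySem.Chars.split₀.go (c :: t) cur []
            = cur.reverse :: PySem.Chars.split₀.go t [] [] := by
          simp only [PySem.Chars.split₀.go, hsp, if_pos, he, Bool.false_eq_true, if_false]
          rw [split₀_go_acc]; simp
        simp only [Igo, hgo, List.map_cons, join_cons, zg, hsp, if_pos]
        rw [ihQ]
        simp only [PySem.Chars.split₀, Igo]
        by_cases ht : PySem.Chars.split₀.go t [] [] = [] <;>
          simp [ht]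
      · have hgo : PySem.Chars.split₀ (c :: t) = PySem.Chars.split₀ t := by
          simp [PySem.Chars.split₀, PySem.Chars.split₀.go, hsp]
        have hIgo : Igo (c :: t) [] = Igo t [] := by
          simp [Igo, PySem.Chars.split₀.go, hsp]
        simp only [zg, hsp, if_pos, hgo, hIgo]
        exact ihQ
    · have hgo : ∀ cur : List Char, PySem.Chars.split₀.go (c :: t) cur []
          = PySem.Chars.split₀.go t (c :: cur) [] := by
        intro cur; simp [PySem.Chars.split₀.go, hsp]
      constructor
      · intro cur h
        have : Igo (c :: t) cur = Igo t (c :: cur) := by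
          simp [Igo, hgo cur]
        rw [this, ihP (c :: cur) (by simp)]
        simp [zg, hsp, List.append_assoc]
      · have hne : PySem.Chars.split₀ (c :: t) ≠ [] := by
          simp only [PySem.Chars.split₀, hgo]
          exact split₀_go_ne t [c] (by simp)
        have : Igo (c :: t) [] = Igo t [c] := by simp [Igo, hgo]
        simp only [zg, hsp, Bool.false_eq_true, if_false, if_true, hne, this,
          ihP [c] (by simp)]
        simp

lemma zwspGo_start (l : List Char) : zwspGo l [] false = Igo l [] := by
  induction l with
  | nil => simp [zwspGo, Igo, PySem.Chars.split₀.go, PySem.Chars.join, List.intercalate]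
  | cons c t ih =>
    by_cases hsp : PySem.Chars.isspace c = true
    · have : Igo (c :: t) [] = Igo t [] := by
        simp [Igo, PySem.Chars.split₀.go, hsp]
      simpa [zwspGo, hsp, this] using ih
    · have h1 : zwspGo (c :: t) [] false = zwspSub c ++ zg t false := by
        simp only [zwspGo, hsp, Bool.false_eq_true, if_false]
        rw [zwspGo_eq_zg t ((zwspSub c).reverse ++ []) false
          (fun h => zwspSub_ne c (by simpa using h))]
        simp
      have h2 : Igo (c :: t) [] = Igo t [c] := by
        simp [Igo, PySem.Chars.split₀.go, hsp]
      rw [h1, h2, (zg_main t).1 [c] (by simp)]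
      simp

-- ===== VERDICT (by name: the statement is the Claim_ definition above) =====
theorem zwsp_wrap_text_py_spec : Claim_equal_zwsp_wrap_text_py := by
  intro s _
  unfold Spec_zwsp_wrap_text_py zwsp_wrap_text_py zwsp_wrap_text_py_alt
  apply String.toList_inj.mp
  rw [String.toList_ofList, zwspGo_start]
  rw [PySem.Str.toList_join]
  have hsep : (" " : String).toList = [' '] := by decide
  rw [hsep]
  unfold Igo
  congr 1
  rw [show PySem.Chars.split₀.go s.toList [] [] = PySem.Chars.split₀ s.toList from rfl,
    ← PySem.Str.split₀_map_toList, List.map_map, List.map_map]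
  apply List.map_congr_left
  intro tok htok
  simp only [Function.comp]
  have hmem : tok.toList ∈ PySem.Chars.split₀ s.toList := by
    rw [← PySem.Str.split₀_map_toList]
    exact List.mem_map_of_mem htok
  exact soften_eq tok (fun c hc => split₀_no_space s.toList tok.toList hmem c hc)
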